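-- pv_equiv track=rewrite | github.com/misaka0502/LIBERO | scripts/create_pcd_dataset.py | _tokenize_bddl_text
-- ===== SOURCE A (Python) =====
-- def _tokenize_bddl_text(text):
--     tokens = []
--     for line in str(text).splitlines():
--         line = line.split(";", 1)[0]
--         if not line.strip():
--             continue
--         tokens.extend(line.replace("(", " ( ").replace(")", " ) ").split())
--     return tokens
-- ===== SOURCE B (Python) =====
-- def _tokenize_bddl_text(text):
--     # Strip comments line by line (same line-boundary semantics as A), then
--     # tokenize the whole cleaned text in ONE character-level pass.
--     cleaned = "\n".join(line.split(";", 1)[0] for line in str(text).splitlines())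
--     tokens = []
--     word = []
--     for ch in cleaned:
--         if ch in "()":
--             if word:
--                 tokens.append("".join(word))
--                 word = []
--             tokens.append(ch)
--         elif ch.isspace():
--             if word:
--                 tokens.append("".join(word))
--                 word = []
--         else:
--             word.append(ch)
--     if word:
--         tokens.append("".join(word))
--     return tokens
-- ===== Notes on version B (the rewrite author's own statement) =====
-- stated objective: alternative
-- what changed: A pads parens with spaces and splits each non-blank line separately (three string passes per line); B joins the comment-stripped lines into one string and tokenizes it in a single character-level scan with an explicit word accumulator.
import Mathlib
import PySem

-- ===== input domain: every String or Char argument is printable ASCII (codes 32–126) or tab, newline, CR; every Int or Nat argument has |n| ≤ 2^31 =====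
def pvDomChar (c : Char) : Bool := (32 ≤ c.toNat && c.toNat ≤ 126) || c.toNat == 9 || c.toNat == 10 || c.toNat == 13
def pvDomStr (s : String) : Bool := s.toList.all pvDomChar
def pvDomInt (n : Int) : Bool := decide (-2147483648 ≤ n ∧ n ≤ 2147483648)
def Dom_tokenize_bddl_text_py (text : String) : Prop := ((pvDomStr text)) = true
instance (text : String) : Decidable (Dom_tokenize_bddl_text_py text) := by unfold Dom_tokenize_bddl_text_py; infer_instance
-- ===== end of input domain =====

-- B replaces A's per-line pad-parens-and-split accumulation by a comment-strip + join
-- followed by ONE character-level scan with a word accumulator (objective: alternative).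

-- ===== PORT A =====
-- literal port of _tokenize_bddl_text: for each splitlines line, cut at ';' (split(";",1)[0]),
-- skip blank lines, pad '('/')' with spaces and extend tokens with the whitespace split.
def tokenize_bddl_text_py (text : String) : List String :=
  (PySem.Str.splitlines text).foldl
    (fun tokens line =>
      let line := PySem.List.pyGetD ((PySem.Str.splitMax? line ";" 1).getD []) 0 ""
      if PySem.Str.strip line = "" then tokens
      else tokens ++ PySem.Str.split₀
        (PySem.Str.replace (PySem.Str.replace line "(" " ( ") ")" " ) ")) []

-- ===== PORT B =====
-- B's scanner loop, on the code points (words kept as List Char until flushed, like Source B's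
-- word list joined at flush time): parens are single tokens, whitespace flushes the word.
def pvFlush (word : List Char) (rest : List (List Char)) : List (List Char) :=
  if word.isEmpty then rest else word :: rest

def pvScanAux : List Char → List Char → List (List Char)
  | [], word => pvFlush word []
  | c :: cs, word =>
    if c = '(' ∨ c = ')' then pvFlush word ([c] :: pvScanAux cs [])
    else if PySem.Chars.isspace c then pvFlush word (pvScanAux cs [])
    else pvScanAux cs (word ++ [c])

-- port of B: cleaned = "\n".join(line.split(";",1)[0] for line in text.splitlines()),
-- then the single-pass scan above over cleaned.
def tokenize_bddl_text_py_alt (text : String) : List String :=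
  let cleaned := PySem.Str.join "\n" ((PySem.Str.splitlines text).map (fun line =>
    PySem.List.pyGetD ((PySem.Str.splitMax? line ";" 1).getD []) 0 ""))
  (pvScanAux cleaned.toList []).map String.ofList

-- ===== PRECONDITION & SPEC =====
def Spec_tokenize_bddl_text_py (text : String) (out : List String) : Prop := out = tokenize_bddl_text_py_alt text
instance (text : String) (out : List String) : Decidable (Spec_tokenize_bddl_text_py text out) := by unfold Spec_tokenize_bddl_text_py; infer_instance

-- ===== CLAIM (what is proved, stated in full; the proofs are below) =====
def Claim_equal_tokenize_bddl_text_py : Prop := ∀ (text : String), Dom_tokenize_bddl_text_py text → Spec_tokenize_bddl_text_py text (tokenize_bddl_text_py text)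

-- ===== LEMMAS AND PROOFS =====

-- the per-character padding A's two replaces amount to
def pvPadc (c : Char) : List Char :=
  if c = '(' then [' ', '(', ' '] else if c = ')' then [' ', ')', ' '] else [c]

lemma pvFlush_eq (word : List Char) (rest : List (List Char)) :
    pvFlush word rest = pvFlush word [] ++ rest := by
  unfold pvFlush; split <;> simp

lemma pvReplace_go_single (o : Char) (new : List Char) :
    ∀ (fuel : Nat) (l acc : List Char), l.length ≤ fuel →
      PySem.Chars.replace.go [o] new fuel l acc
        = acc.reverse ++ l.flatMap (fun c => if c = o then new else [c]) := by
  intro fuel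
  induction fuel with
  | zero => intro l acc h; simp at h; subst h; simp [PySem.Chars.replace.go]
  | succ n ih =>
    intro l acc h
    cases l with
    | nil => simp [PySem.Chars.replace.go]
    | cons c t =>
      simp only [List.length_cons] at h
      by_cases hc : c = o
      · subst hc
        have : List.isPrefixOf [c] (c :: t) = true := by simp [List.isPrefixOf]
        simp [PySem.Chars.replace.go, this, ih t _ (by omega)]
      · have : List.isPrefixOf [o] (c :: t) = false := by
          simp [List.isPrefixOf]; intro h'; exact absurd h'.symm hc
        simp [PySem.Chars.replace.go, this, ih t _ (by omega), hc]

lemma pvReplace_single (l : List Char) (o : Char) (new : List Char) :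
    PySem.Chars.replace l [o] new = l.flatMap (fun c => if c = o then new else [c]) := by
  simp [PySem.Chars.replace]
  exact pvReplace_go_single o new l.length l [] le_rfl

lemma pvPad_eq (l : List Char) :
    PySem.Chars.replace (PySem.Chars.replace l ['('] [' ', '(', ' ']) [')'] [' ', ')', ' ']
      = l.flatMap pvPadc := by
  rw [pvReplace_single, pvReplace_single]
  induction l with
  | nil => simp
  | cons c t ih =>
    simp only [List.flatMap_cons, List.flatMap_append, ih, pvPadc]
    by_cases h1 : c = '('
    · subst h1; simp
    · by_cases h2 : c = ')'
      · subst h2; simp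
      · simp [h1, h2]

lemma pvIsspace_lparen : PySem.Chars.isspace '(' = false := by decide
lemma pvIsspace_rparen : PySem.Chars.isspace ')' = false := by decide
lemma pvIsspace_space : PySem.Chars.isspace ' ' = true := by decide
lemma pvIsspace_nl : PySem.Chars.isspace '\n' = true := by decide

lemma pvScan_go (l : List Char) :
    ∀ (cur : List Char) (accL : List (List Char)),
      PySem.Chars.split₀.go (l.flatMap pvPadc) cur accL
        = accL.reverse ++ pvScanAux l cur.reverse := by
  induction l with
  | nil =>
    intro cur accL
    cases hc : cur.isEmpty <;>
      simp [PySem.Chars.split₀.go, pvScanAux, pvFlush, hc]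
  | cons c t ih =>
    intro cur accL
    by_cases h1 : c = '('
    · subst h1
      cases hc : cur.isEmpty <;>
        simp [pvPadc, PySem.Chars.split₀.go, pvIsspace_lparen, pvIsspace_space, hc, ih,
              pvScanAux, pvFlush]
    · by_cases h2 : c = ')'
      · subst h2
        cases hc : cur.isEmpty <;>
          simp [pvPadc, PySem.Chars.split₀.go, pvIsspace_rparen, pvIsspace_space, hc, ih,
                pvScanAux, pvFlush, h1]
      · by_cases hs : PySem.Chars.isspace c = true
        · cases hc : cur.isEmpty <;>
            simp [pvPadc, PySem.Chars.split₀.go, hs, hc, ih, pvScanAux, pvFlush, h1, h2]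
        · simp only [Bool.not_eq_true] at hs
          simp [pvPadc, PySem.Chars.split₀.go, hs, ih, pvScanAux, h1, h2]

lemma pvScan_blank (l : List Char) (h : ∀ c ∈ l, PySem.Chars.isspace c = true) :
    ∀ word, pvScanAux l word = pvFlush word [] := by
  induction l with
  | nil => intro word; simp [pvScanAux]
  | cons c t ih =>
    intro word
    have hc := h c (by simp)
    have h1 : ¬ (c = '(' ∨ c = ')') := by
      rintro (rfl | rfl) <;> simp [pvIsspace_lparen, pvIsspace_rparen] at hc
    have ht : ∀ c ∈ t, PySem.Chars.isspace c = true := fun c hm => h c (by simp [hm])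
    simp [pvScanAux, h1, hc, ih ht, pvFlush]

lemma pvStrip_blank (l : List Char) (h : PySem.Chars.strip l = []) :
    ∀ c ∈ l, PySem.Chars.isspace c = true := by
  unfold PySem.Chars.strip PySem.Chars.rstrip at h
  have h' := congrArg List.reverse h
  simp at h'
  intro c hc
  have : c ∈ l.takeWhile PySem.Chars.isspace ∨ c ∈ l.dropWhile PySem.Chars.isspace := by
    rw [← List.mem_append, List.takeWhile_append_dropWhile]; exact hc
  rcases this with h1 | h1
  · exact List.mem_takeWhile_imp h1
  · exact h' c h1

lemma pvPerLine (s : String) :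
    (if PySem.Str.strip s = "" then ([] : List String)
     else PySem.Str.split₀ (PySem.Str.replace (PySem.Str.replace s "(" " ( ") ")" " ) "))
      = (pvScanAux s.toList []).map String.ofList := by
  have hval : PySem.Str.split₀ (PySem.Str.replace (PySem.Str.replace s "(" " ( ") ")" " ) ")
      = (pvScanAux s.toList []).map String.ofList := by
    have : (PySem.Str.replace (PySem.Str.replace s "(" " ( ") ")" " ) ").toList
        = s.toList.flatMap pvPadc := by
      simp [PySem.Str.toList_replace]
      exact pvPad_eq s.toList
    simp [PySem.Str.split₀, this, PySem.Chars.split₀]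
    have := pvScan_go s.toList [] []
    simp at this
    rw [this]
  split
  · next hb =>
    have hb' : PySem.Chars.strip s.toList = [] := by
      have := congrArg String.toList hb
      simpa [PySem.Str.strip] using this
    rw [pvScan_blank s.toList (pvStrip_blank s.toList hb') [], pvFlush]
    simp
  · exact hval

lemma pvScan_join (l1 l2 : List Char) :
    ∀ word, pvScanAux (l1 ++ '\n' :: l2) word = pvScanAux l1 word ++ pvScanAux l2 [] := by
  induction l1 with
  | nil =>
    intro word
    simp [pvScanAux, pvIsspace_nl]
    rw [pvFlush_eq]
  | cons c t ih =>
    intro word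
    by_cases h1 : c = '(' ∨ c = ')'
    · simp only [List.cons_append, pvScanAux, h1, if_pos, ih]
      rw [pvFlush_eq, pvFlush_eq (rest := [c] :: pvScanAux t [])]
      simp
    · by_cases hs : PySem.Chars.isspace c = true
      · simp [pvScanAux, h1, hs, ih]
        rw [pvFlush_eq, pvFlush_eq (rest := pvScanAux t [])]
        simp
      · simp only [Bool.not_eq_true] at hs
        simp [pvScanAux, h1, hs, ih]

lemma pvMain (ls : List String) (t : List String) :
    ls.foldl
      (fun tokens line =>
        if PySem.Str.strip line = "" then tokens
        else tokens ++ PySem.Str.split₀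
          (PySem.Str.replace (PySem.Str.replace line "(" " ( ") ")" " ) ")) t
      = t ++ (pvScanAux (PySem.Chars.join ['\n'] (ls.map String.toList)) []).map String.ofList := by
  induction ls generalizing t with
  | nil => simp [PySem.Chars.join_nil, pvScanAux, pvFlush]
  | cons l rest ih =>
    cases rest with
    | nil =>
      simp only [List.foldl_cons, List.foldl_nil, List.map_cons, List.map_nil,
        PySem.Chars.join_singleton]
      rw [← pvPerLine l]
      split <;> simp
    | cons l2 rest2 =>
      rw [List.foldl_cons, ih]
      simp only [List.map_cons, PySem.Chars.join_cons_cons]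
      rw [show l.toList ++ ['\n'] ++ PySem.Chars.join ['\n'] (l2.toList :: rest2.map String.toList)
            = l.toList ++ '\n' :: PySem.Chars.join ['\n'] (l2.toList :: rest2.map String.toList) by simp]
      rw [pvScan_join, List.map_append, ← pvPerLine l]
      split <;> simp

-- ===== VERDICT (by name: the statement is the Claim_ definition above) =====
set_option maxHeartbeats 1000000 in
theorem tokenize_bddl_text_py_spec : Claim_equal_tokenize_bddl_text_py := by
  intro text _
  show tokenize_bddl_text_py text = tokenize_bddl_text_py_alt text
  have h1 : ∀ (lines : List String) (t : List String),
      lines.foldl (fun tokens line =>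
        let line := PySem.List.pyGetD ((PySem.Str.splitMax? line ";" 1).getD []) 0 ""
        if PySem.Str.strip line = "" then tokens
        else tokens ++ PySem.Str.split₀
          (PySem.Str.replace (PySem.Str.replace line "(" " ( ") ")" " ) ")) t
      = (lines.map (fun line => PySem.List.pyGetD ((PySem.Str.splitMax? line ";" 1).getD []) 0 "")).foldl
        (fun tokens line =>
          if PySem.Str.strip line = "" then tokens
          else tokens ++ PySem.Str.split₀
            (PySem.Str.replace (PySem.Str.replace line "(" " ( ") ")" " ) ")) t := by
    intro lines
    induction lines with
    | nil => intro t; simp only [List.foldl_nil, List.map_nil]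
    | cons a as ih => intro t; simp only [List.foldl_cons, List.map_cons]; exact ih _
  unfold tokenize_bddl_text_py
  rw [h1, pvMain]
  simp [tokenize_bddl_text_py_alt, PySem.Str.join, List.map_map]
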